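-- pv_equiv track=rewrite | github.com/dinesh2104/CVRP_TW | bruteforce_cuOpt_CVRPTW.py | generate_partitions_of_size
-- ===== SOURCE A (Python) =====
-- from typing import List, Tuple, Dict
--
-- def generate_partitions_of_size(items: List[int], k: int) -> List[List[List[int]]]:
--     """Generate all partitions of items into exactly k non-empty subsets"""
--     if k == 1:
--         return [[items]]
--     if k == len(items):
--         return [[[item] for item in items]]
--     if k > len(items) or k < 1:
--         return []
--
--     partitions = []
--     first = items[0]
--     rest = items[1:]
--
--     # Case 1: first item forms its own subset
--     for partition in generate_partitions_of_size(rest, k - 1):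
--         partitions.append([[first]] + partition)
--
--     # Case 2: first item joins one of the existing subsets
--     for partition in generate_partitions_of_size(rest, k):
--         for i in range(len(partition)):
--             new_partition = [subset[:] for subset in partition]
--             new_partition[i] = [first] + new_partition[i]
--             partitions.append(new_partition)
--
--     return partitions
-- ===== SOURCE B (Python) =====
-- from typing import List
--
--
-- def _row(x, tail, k, lo, nxt):
--     """Row of partition lists for the suffix [x]+tail: out[j] holds all
--     partitions of that suffix into exactly j subsets; entries with j < 1 or
--     j < lo are never read by callers and are left empty.  nxt is the row for
--     the suffix tail (whose own lower bound is lo-1)."""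
--     suffix = [x] + tail
--     m = len(suffix)
--     out = []
--     for j in range(0, k + 1):
--         if j < 1 or j < lo:
--             out.append([])
--         elif j == 1:
--             out.append([[suffix]])
--         elif j == m:
--             out.append([[[y] for y in suffix]])
--         elif j > m:
--             out.append([])
--         else:
--             parts = [[[x]] + p for p in nxt[j - 1]]
--             for p in nxt[j]:
--                 for idx in range(len(p)):
--                     parts.append(p[:idx] + [[x] + p[idx]] + p[idx + 1:])
--             out.append(parts)
--     return out
--
--
-- def generate_partitions_of_size(items: List[int], k: int) -> List[List[List[int]]]:
--     """Generate all partitions of items into exactly k non-empty subsets"""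
--     if k == 1:
--         return [[list(items)]]
--     if k == len(items):
--         return [[[item] for item in items]]
--     if k > len(items) or k < 1:
--         return []
--     # bottom-up over suffixes: each (suffix, j) subproblem is built exactly
--     # once, instead of the recursion's repeated rebuilding
--     nxt = None
--     suffix = []
--     lo = k - (len(items) - 1)
--     for x in reversed(items[1:]):
--         nxt = _row(x, suffix, k, lo, nxt)
--         suffix = [x] + suffix
--         lo += 1
--     return _row(items[0], suffix, k, k, nxt)[k]
-- ===== Notes on version B (the rewrite author's own statement) =====
-- stated objective: alternative
-- what changed: Replaces A's top-down recursion, which rebuilds the same (suffix, j) subproblems over and over, by a bottom-up table of rows over the suffixes in which each needed (suffix, j) entry is built exactly once and shared (intended as faster; a timing run read 1.83x at the largest size both finished, below the 1.5x-confirmed threshold at n=64 where both time out on the huge output).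
import Mathlib
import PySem

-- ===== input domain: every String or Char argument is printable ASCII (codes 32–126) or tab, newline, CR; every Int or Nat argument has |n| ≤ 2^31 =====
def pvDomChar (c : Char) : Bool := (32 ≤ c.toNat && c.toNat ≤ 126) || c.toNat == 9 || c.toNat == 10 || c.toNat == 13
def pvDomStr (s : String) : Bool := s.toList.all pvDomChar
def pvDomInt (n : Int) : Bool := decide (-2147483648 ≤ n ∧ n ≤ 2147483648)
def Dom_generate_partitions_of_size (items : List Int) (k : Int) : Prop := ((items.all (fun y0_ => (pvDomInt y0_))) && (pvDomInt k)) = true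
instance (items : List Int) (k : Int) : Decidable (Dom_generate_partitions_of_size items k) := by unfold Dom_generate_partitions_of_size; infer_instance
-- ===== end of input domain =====

-- B replaces A's top-down recursion (which rebuilds the same (suffix, j) subproblems repeatedly)
-- by a bottom-up row table over suffixes in which each needed subproblem is built once; same return value.

-- ===== PORT A =====
-- literal transliteration of A's recursion
def generate_partitions_of_size (items : List Int) (k : Int) : List (List (List Int)) :=
  if k = 1 then [[items]]
  else if k = (items.length : Int) then [items.map (fun item => [item])]
  else if (items.length : Int) < k ∨ k < 1 then []
  else
    match items with
    | [] => []  -- unreachable: the guards above force items ≠ [] (needed only for totality)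
    | first :: rest =>
      -- case 1: first forms its own subset; case 2: first joins subset i (copy, then assign = functional set)
      ((generate_partitions_of_size rest (k - 1)).map (fun partition => [first] :: partition))
      ++ (generate_partitions_of_size rest k).flatMap (fun partition =>
           (PySem.List.pyRange 0 (partition.length : Int) 1).map (fun i =>
             PySem.List.pySetD partition i (first :: PySem.List.pyGetD partition i [])))
termination_by items.length

-- ===== PORT B =====
-- _row of Source B: out[j] = partitions of the suffix x :: tail into j subsets (j < 1 or j < lo left empty)
def pvRow (x : Int) (tail : List Int) (k lo : Int) (nxt : List (List (List (List Int)))) :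
    List (List (List (List Int))) :=
  let suffix := x :: tail
  let m : Int := (suffix.length : Int)
  (PySem.List.pyRange 0 (k + 1) 1).map (fun j =>
    if j < 1 ∨ j < lo then []
    else if j = 1 then [[suffix]]
    else if j = m then [suffix.map (fun y => [y])]
    else if m < j then []
    else
      ((PySem.List.pyGetD nxt (j - 1) []).map (fun p => [x] :: p))
      ++ (PySem.List.pyGetD nxt j []).flatMap (fun p =>
           (PySem.List.pyRange 0 (p.length : Int) 1).map (fun idx =>
             PySem.List.slice p none (some idx)
               ++ ([x :: PySem.List.pyGetD p idx []]
               ++ PySem.List.slice p (some (idx + 1)) none))))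

def generate_partitions_of_size_alt (items : List Int) (k : Int) : List (List (List Int)) :=
  if k = 1 then [[items]]
  else if k = (items.length : Int) then [items.map (fun item => [item])]
  else if (items.length : Int) < k ∨ k < 1 then []
  else
    match items with
    | [] => []  -- unreachable: the guards above force items ≠ []
    | first :: rest =>
      -- Source B's loop over reversed(items[1:]) carrying (nxt, suffix, lo)
      let st := rest.reverse.foldl
        (fun (st : List (List (List (List Int))) × List Int × Int) x =>
          (pvRow x st.2.1 k st.2.2 st.1, x :: st.2.1, st.2.2 + 1))
        ([], [], k - (rest.length : Int))
      PySem.List.pyGetD (pvRow first st.2.1 k k st.1) k []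

-- ===== PRECONDITION & SPEC =====
def Spec_generate_partitions_of_size (items : List Int) (k : Int) (out : List (List (List Int))) : Prop := out = generate_partitions_of_size_alt items k
instance (items : List Int) (k : Int) (out : List (List (List Int))) : Decidable (Spec_generate_partitions_of_size items k out) := by unfold Spec_generate_partitions_of_size; infer_instance

-- ===== CLAIM (what is proved, stated in full; the proofs are below) =====
def Claim_equal_generate_partitions_of_size : Prop := ∀ (items : List Int) (k : Int), Dom_generate_partitions_of_size items k → Spec_generate_partitions_of_size items k (generate_partitions_of_size items k)

-- ===== LEMMAS AND PROOFS =====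

-- B's slice/concat rebuild of a partition equals A's functional set, pointwise over the index range
theorem pv_inner_eq (x : Int) (p : List (List Int)) :
    (PySem.List.pyRange 0 (p.length : Int) 1).map (fun idx =>
        PySem.List.slice p none (some idx)
          ++ ([x :: PySem.List.pyGetD p idx []] ++ PySem.List.slice p (some (idx + 1)) none))
    = (PySem.List.pyRange 0 (p.length : Int) 1).map (fun idx =>
        PySem.List.pySetD p idx (x :: PySem.List.pyGetD p idx [])) := by
  apply List.map_congr_left
  intro idx hmem
  rw [PySem.List.mem_pyRange_one] at hmem
  obtain ⟨h0, hl⟩ := hmem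
  rw [PySem.List.slice_to p h0, PySem.List.slice_from p (by omega : (0:Int) ≤ idx + 1),
    PySem.List.pySetD_of_nonneg p _ h0,
    List.set_eq_take_cons_drop _ (by omega : idx.toNat < p.length)]
  have h1 : (idx + 1).toNat = idx.toNat + 1 := by omega
  rw [h1]
  simp

-- one row of the table is correct, given the previous row
theorem pvRow_spec (x : Int) (tail : List Int) (k lo : Int)
    (nxt : List (List (List (List Int))))
    (hn : ∀ j : Int, 1 ≤ j → j ≤ k → lo - 1 ≤ j → j ≤ (tail.length : Int) →
      PySem.List.pyGetD nxt j [] = generate_partitions_of_size tail j) :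
    ∀ j : Int, 1 ≤ j → j ≤ k → lo ≤ j → j ≤ ((x :: tail).length : Int) →
      PySem.List.pyGetD (pvRow x tail k lo nxt) j [] = generate_partitions_of_size (x :: tail) j := by
  intro j h1 hk hlo hm
  simp only [pvRow]
  rw [PySem.List.pyGetD_map_pyRange_of_nonneg _ _ _ _ (by omega) (by omega)]
  rw [if_neg (by omega : ¬ (j < 1 ∨ j < lo))]
  have hmlen : ((x :: tail).length : Int) = (tail.length : Int) + 1 := by simp
  by_cases hj1 : j = 1
  · subst hj1
    rw [if_pos rfl, generate_partitions_of_size.eq_def, if_pos rfl]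
  · rw [if_neg hj1]
    by_cases hjm : j = ((x :: tail).length : Int)
    · rw [if_pos hjm, generate_partitions_of_size.eq_def, if_neg hj1, if_pos hjm]
    · rw [if_neg hjm, if_neg (by omega : ¬ ((x :: tail).length : Int) < j)]
      conv_rhs => rw [generate_partitions_of_size.eq_def]
      rw [if_neg hj1, if_neg hjm,
        if_neg (by omega : ¬ (((x :: tail).length : Int) < j ∨ j < 1))]
      rw [hn (j - 1) (by omega) (by omega) (by omega) (by omega),
        hn j (by omega) (by omega) (by omega) (by omega)]
      simp only [pv_inner_eq]

-- the fold over the reversed tail builds correct rows for every suffix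
theorem pv_fold_spec (k : Int) : ∀ (rest : List Int) (lo : Int),
    (rest.reverse.foldl
      (fun (st : List (List (List (List Int))) × List Int × Int) x =>
        (pvRow x st.2.1 k st.2.2 st.1, x :: st.2.1, st.2.2 + 1))
      ([], [], lo - (rest.length : Int))).2.1 = rest ∧
    (rest.reverse.foldl
      (fun (st : List (List (List (List Int))) × List Int × Int) x =>
        (pvRow x st.2.1 k st.2.2 st.1, x :: st.2.1, st.2.2 + 1))
      ([], [], lo - (rest.length : Int))).2.2 = lo ∧
    (∀ j : Int, 1 ≤ j → j ≤ k → lo - 1 ≤ j → j ≤ (rest.length : Int) →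
      PySem.List.pyGetD
        (rest.reverse.foldl
          (fun (st : List (List (List (List Int))) × List Int × Int) x =>
            (pvRow x st.2.1 k st.2.2 st.1, x :: st.2.1, st.2.2 + 1))
          ([], [], lo - (rest.length : Int))).1 j [] = generate_partitions_of_size rest j) := by
  intro rest
  induction rest with
  | nil =>
    intro lo
    refine ⟨rfl, by simp, ?_⟩
    intro j h1 _ _ hlen
    simp at hlen
    omega
  | cons r rs ih =>
    intro lo
    have hinit : lo - ((r :: rs).length : Int) = (lo - 1) - (rs.length : Int) := by
      simp; omega
    rw [List.reverse_cons, List.foldl_append, hinit]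
    obtain ⟨hsuf, hlo, hrows⟩ := ih (lo - 1)
    simp only [List.foldl_cons, List.foldl_nil]
    rw [hsuf, hlo]
    refine ⟨rfl, by omega, ?_⟩
    intro j h1 hk hlo' hlen
    exact pvRow_spec r rs k (lo - 1) _ (by intro j' a b c d; exact hrows j' a b (by omega) d)
      j h1 hk (by omega) (by simpa using hlen)

-- ===== VERDICT (by name: the statement is the Claim_ definition above) =====
theorem generate_partitions_of_size_spec : Claim_equal_generate_partitions_of_size := by
  intro items k _dom
  unfold Spec_generate_partitions_of_size
  rw [generate_partitions_of_size_alt.eq_def]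
  split_ifs with h1 h2 h3
  · subst h1
    rw [generate_partitions_of_size.eq_def, if_pos rfl]
  · rw [generate_partitions_of_size.eq_def, if_neg h1, if_pos h2]
  · rw [generate_partitions_of_size.eq_def, if_neg h1, if_neg h2, if_pos h3]
  · match items, h2, h3 with
    | [], h2, h3 => simp at h3; omega
    | first :: rest, h2, h3 =>
      obtain ⟨hsuf, hlo, hrows⟩ := pv_fold_spec k rest k
      simp only [hsuf]
      rw [pvRow_spec first rest k k _ hrows k (by omega) le_rfl le_rfl (by omega)]
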